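-- pv_equiv track=rewrite | github.com/nkorobkov/competitive-programming | codeforces/1118/C.py | printv
-- ===== SOURCE A (Python) =====
-- def printv(v,n,  stri = [], mid=[]):
--     if n%2 == 0:
--         ans = []
--         for i in range(n//2):
--             string = []
--             for j in range(n//2):
--                 string.append(v[i*(n//2) + j])
--             ans.append(string + string[::-1])
--         ans = ans+ans[::-1]
--         return ans
--     else:
--         ans = []
--         for i in range(n // 2):
--             string = []
--             for j in range(n // 2):
--                 string.append(v[i * (n // 2) + j])
--             ans.append(string +[stri[i]]+ string[::-1])
--
--         middle = stri[n//2:] + mid + list(reversed(stri[n//2:]))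
--         ans = ans+ [middle]+ ans[::-1]
--         return ans
-- ===== SOURCE B (Python) =====
-- def printv(v, n, stri=[], mid=[]):
--     # Fill the full n x n answer cell by cell via reflected base indices,
--     # instead of building a quadrant and mirroring with slices.
--     h = n // 2
--     odd = n % 2 == 1
--     res = []
--     for i in range(n):
--         if odd and i == h:
--             half = stri[h:]
--             res.append(half + mid + half[::-1])
--             continue
--         bi = i if i < h else n - 1 - i
--         row = []
--         for j in range(n):
--             if odd and j == h:
--                 row.append(stri[bi])
--             else:
--                 bj = j if j < h else n - 1 - j
--                 row.append(v[bi * h + bj])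
--         res.append(row)
--     return res
-- ===== Notes on version B (the rewrite author's own statement) =====
-- stated objective: alternative
-- what changed: B fills the full n×n result cell by cell in one nested loop using reflected base indices (bi = i if i<n//2 else n-1-i, same for bj) with explicit middle-row/column cases, instead of A's building the top-left quadrant rows and mirroring them with list slicing and reversal.
-- outside the precondition, e.g. on printv([], -1, [5], [7]): A returns [[5, 7, 5]], B returns []
import Mathlib
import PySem

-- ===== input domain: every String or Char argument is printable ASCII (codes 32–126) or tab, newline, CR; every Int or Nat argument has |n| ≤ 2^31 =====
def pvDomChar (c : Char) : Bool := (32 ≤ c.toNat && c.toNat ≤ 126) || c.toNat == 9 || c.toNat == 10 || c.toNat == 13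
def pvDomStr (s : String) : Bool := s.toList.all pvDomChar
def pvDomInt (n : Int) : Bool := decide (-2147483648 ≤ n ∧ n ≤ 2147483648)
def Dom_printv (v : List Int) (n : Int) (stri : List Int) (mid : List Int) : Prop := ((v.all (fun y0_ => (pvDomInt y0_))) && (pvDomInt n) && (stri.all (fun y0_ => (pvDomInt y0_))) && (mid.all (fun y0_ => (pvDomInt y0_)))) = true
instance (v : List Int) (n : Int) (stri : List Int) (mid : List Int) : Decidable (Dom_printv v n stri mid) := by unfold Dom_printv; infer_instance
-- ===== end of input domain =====

-- B fills the full n×n matrix cell by cell from reflected base indices (one formula per cell)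
-- instead of A's quadrant-building plus list-slice mirroring; objective: alternative decomposition, same cost.

-- ===== PORT A =====
def printv (v : List Int) (n : Int) (stri : List Int) (mid : List Int) : List (List Int) :=
  if PySem.Int.mod n 2 = 0 then
    let ans := (PySem.List.pyRange 0 (PySem.Int.floordiv n 2) 1).map (fun i =>
      let string := (PySem.List.pyRange 0 (PySem.Int.floordiv n 2) 1).map (fun j =>
        PySem.List.pyGetD v (i * PySem.Int.floordiv n 2 + j) 0)
      string ++ string.reverse)
    ans ++ ans.reverse
  else
    let ans := (PySem.List.pyRange 0 (PySem.Int.floordiv n 2) 1).map (fun i =>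
      let string := (PySem.List.pyRange 0 (PySem.Int.floordiv n 2) 1).map (fun j =>
        PySem.List.pyGetD v (i * PySem.Int.floordiv n 2 + j) 0)
      string ++ [PySem.List.pyGetD stri i 0] ++ string.reverse)
    let middle := PySem.List.slice stri (some (PySem.Int.floordiv n 2)) none ++ mid
        ++ (PySem.List.slice stri (some (PySem.Int.floordiv n 2)) none).reverse
    ans ++ [middle] ++ ans.reverse

-- ===== PORT B =====
def printv_alt (v : List Int) (n : Int) (stri : List Int) (mid : List Int) : List (List Int) :=
  let h := PySem.Int.floordiv n 2
  (PySem.List.pyRange 0 n 1).map (fun i =>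
    if PySem.Int.mod n 2 = 1 ∧ i = h then
      let half := PySem.List.slice stri (some h) none
      half ++ mid ++ half.reverse
    else
      let bi := if i < h then i else n - 1 - i
      (PySem.List.pyRange 0 n 1).map (fun j =>
        if PySem.Int.mod n 2 = 1 ∧ j = h then
          PySem.List.pyGetD stri bi 0
        else
          let bj := if j < h then j else n - 1 - j
          PySem.List.pyGetD v (bi * h + bj) 0))

-- ===== PRECONDITION & SPEC =====
-- Pre_ restricts to the natural domain of a matrix size, 0 ≤ n (for odd negative n, A's slice
-- arithmetic accidentally returns a one-row list), and to inputs where A's indexing does not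
-- raise IndexError: v must hold the (n//2)² quadrant values and, for odd n, stri the n//2 middles.
def Pre_printv (v : List Int) (n : Int) (stri : List Int) (mid : List Int) : Prop :=
  0 ≤ n ∧ PySem.Int.floordiv n 2 * PySem.Int.floordiv n 2 ≤ (v.length : Int) ∧
    (PySem.Int.mod n 2 = 1 → PySem.Int.floordiv n 2 ≤ (stri.length : Int))
instance (v : List Int) (n : Int) (stri : List Int) (mid : List Int) : Decidable (Pre_printv v n stri mid) := by unfold Pre_printv; infer_instance

def pvWitness_printv : List Int × Int × List Int × List Int := ([1, 2, 3, 4], 5, [7, 8], [9])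

def Spec_printv (v : List Int) (n : Int) (stri : List Int) (mid : List Int) (out : List (List Int)) : Prop := out = printv_alt v n stri mid
instance (v : List Int) (n : Int) (stri : List Int) (mid : List Int) (out : List (List Int)) : Decidable (Spec_printv v n stri mid out) := by unfold Spec_printv; infer_instance

-- ===== CLAIM (what is proved, stated in full; the proofs are below) =====
def Claim_equal_printv : Prop := ∀ (v : List Int) (n : Int) (stri : List Int) (mid : List Int), Dom_printv v n stri mid → Pre_printv v n stri mid → Spec_printv v n stri mid (printv v n stri mid)


-- ===== LEMMAS AND PROOFS =====

-- a mirrored list (l ++ l.reverse) written as a map over range (2*H)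
lemma pv_mirror {A : Type} (l : List A) (g : Nat → A) (H : Nat)
    (hlen : l.length = H)
    (h1 : ∀ k, (hk : k < H) → l[k]'(by omega) = g k)
    (h2 : ∀ k, H ≤ k → k < 2*H → g k = g (2*H-1-k)) :
    l ++ l.reverse = (List.range (2*H)).map g := by
  apply List.ext_getElem
  · simp [hlen]; omega
  · intro i hi1 hi2
    simp only [List.length_map, List.length_range] at hi2
    rw [List.getElem_map, List.getElem_range]
    by_cases hiH : i < H
    · rw [List.getElem_append_left (by omega)]
      exact h1 i hiH
    · rw [List.getElem_append_right (by omega), List.getElem_reverse]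
      rw [h2 i (by omega) hi2]
      have hk : l.length - 1 - (i - l.length) = 2*H-1-i := by omega
      simp only [hk]
      exact h1 _ (by omega)

-- a mirrored list with a middle element, as a map over range (2*H+1)
lemma pv_mirror_mid {A : Type} (l : List A) (c : A) (g : Nat → A) (H : Nat)
    (hlen : l.length = H)
    (h1 : ∀ k, (hk : k < H) → l[k]'(by omega) = g k)
    (hc : c = g H)
    (h2 : ∀ k, H < k → k < 2*H+1 → g k = g (2*H-k)) :
    l ++ [c] ++ l.reverse = (List.range (2*H+1)).map g := by
  apply List.ext_getElem
  · simp [hlen]; omega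
  · intro i hi1 hi2
    simp only [List.length_map, List.length_range] at hi2
    rw [List.getElem_map, List.getElem_range]
    rcases lt_trichotomy i H with hiH | hiH | hiH
    · rw [List.getElem_append_left (by simp only [List.length_append, List.length_singleton, hlen]; omega),
        List.getElem_append_left (by omega)]
      exact h1 i hiH
    · subst hiH
      rw [List.getElem_append_left (by simp only [List.length_append, List.length_singleton, hlen]; omega),
        List.getElem_append_right (by omega)]
      simp only [hlen, Nat.sub_self, List.getElem_singleton]
      exact hc
    · rw [List.getElem_append_right (by simp only [List.length_append, List.length_singleton, hlen]; omega), List.getElem_reverse]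
      rw [h2 i hiH hi2]
      have hk : l.length - 1 - (i - (l ++ [c]).length) = 2*H-i := by
        simp only [List.length_append, List.length_singleton, hlen]; omega
      simp only [hk]
      exact h1 _ (by omega)

-- ===== VERDICT (by name: the statement is the Claim_ definition above) =====
theorem printv_spec : Claim_equal_printv := by
  intro v n stri mid _ hpre
  obtain ⟨hn, hv, hs⟩ := hpre
  unfold Spec_printv
  obtain ⟨m, rfl⟩ := Int.eq_ofNat_of_zero_le hn
  have hfd : PySem.Int.floordiv (m:Int) 2 = ((m/2 : Nat) : Int) := by
    exact_mod_cast PySem.Int.floordiv_natCast m 2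
  have hmd : PySem.Int.mod (m:Int) 2 = ((m%2 : Nat) : Int) := by
    exact_mod_cast PySem.Int.mod_natCast m 2
  rw [hfd] at hv
  by_cases hpar : m % 2 = 0
  · -- even size
    obtain ⟨H, rfl⟩ : ∃ H, m = 2*H := ⟨m/2, by omega⟩
    have hH : 2*H/2 = H := by omega
    rw [printv, printv_alt]
    simp only [hfd, hmd, hH, hpar, Nat.cast_zero,
      show ((0:Int) = 1) = False from by simp, false_and, if_false,
      PySem.List.pyRange_zero_natCast, List.map_map]
    refine pv_mirror _ _ H (by simp) ?e1 ?e2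
    case e1 =>
      intro i hiH
      rw [List.getElem_map, List.getElem_range]
      simp only [Function.comp]
      rw [if_pos (show ((i:Int)) < ((H:Nat):Int) by exact_mod_cast hiH)]
      refine pv_mirror _ _ H (by simp) ?f1 ?f2
      case f1 =>
        intro j hjH
        rw [List.getElem_map, List.getElem_range]
        simp only [Function.comp]
        rw [if_pos (show ((j:Int)) < ((H:Nat):Int) by exact_mod_cast hjH)]
      case f2 =>
        intro j hj1 hj2
        simp only [Function.comp]
        rw [if_neg (show ¬((j:Int)) < ((H:Nat):Int) by omega),
          if_pos (show (((2*H-1-j:Nat)):Int) < ((H:Nat):Int) by omega)]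
        congr 1
        omega
    case e2 =>
      intro k hk1 hk2
      simp only [Function.comp]
      rw [if_neg (show ¬((k:Int)) < ((H:Nat):Int) by omega),
        if_pos (show (((2*H-1-k:Nat)):Int) < ((H:Nat):Int) by omega)]
      simp only [show ((2*H:Nat):Int) - 1 - (k:Int) = ((2*H-1-k:Nat):Int) from by omega]
  · -- odd size
    obtain ⟨H, rfl⟩ : ∃ H, m = 2*H+1 := ⟨m/2, by omega⟩
    have hH : (2*H+1)/2 = H := by omega
    have hmod : (2*H+1) % 2 = 1 := by omega
    rw [printv, printv_alt]
    simp only [hfd, hmd, hH, hmod, Nat.cast_one,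
      show ((1:Int) = 0) = False from by simp, if_false,
      show (((1:Int) = 1)) = True from by simp, true_and,
      PySem.List.pyRange_zero_natCast, List.map_map]
    refine pv_mirror_mid _ _ _ H (by simp) ?o1 ?oc ?o2
    case o1 =>
      intro i hiH
      rw [List.getElem_map, List.getElem_range]
      simp only [Function.comp]
      rw [if_neg (show ¬((i:Int)) = ((H:Nat):Int) by omega),
        if_pos (show ((i:Int)) < ((H:Nat):Int) by exact_mod_cast hiH)]
      refine pv_mirror_mid _ _ _ H (by simp) ?p1 ?pc ?p2
      case p1 =>
        intro j hjH
        rw [List.getElem_map, List.getElem_range]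
        simp only [Function.comp]
        rw [if_neg (show ¬((j:Int)) = ((H:Nat):Int) by omega),
          if_pos (show ((j:Int)) < ((H:Nat):Int) by exact_mod_cast hjH)]
      case pc =>
        simp only [Function.comp, if_pos trivial]
      case p2 =>
        intro j hj1 hj2
        simp only [Function.comp]
        rw [if_neg (show ¬((j:Int)) = ((H:Nat):Int) by omega),
          if_neg (show ¬((j:Int)) < ((H:Nat):Int) by omega),
          if_neg (show ¬(((2*H-j:Nat)):Int) = ((H:Nat):Int) by omega),
          if_pos (show (((2*H-j:Nat)):Int) < ((H:Nat):Int) by omega)]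
        congr 1
        omega
    case oc =>
      simp only [Function.comp, if_pos trivial]
    case o2 =>
      intro k hk1 hk2
      simp only [Function.comp]
      rw [if_neg (show ¬((k:Int)) = ((H:Nat):Int) by omega),
        if_neg (show ¬((k:Int)) < ((H:Nat):Int) by omega),
        if_neg (show ¬(((2*H-k:Nat)):Int) = ((H:Nat):Int) by omega),
        if_pos (show (((2*H-k:Nat)):Int) < ((H:Nat):Int) by omega)]
      simp only [show ((2*H+1:Nat):Int) - 1 - (k:Int) = ((2*H-k:Nat):Int) from by omega]
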